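-- pv_equiv track=rewrite | github.com/ForeverHaibara/GeomTool | GeomTool.py | split_to_info
-- ===== SOURCE A (Python) =====
-- comment_marker = "#"
--
-- construction_seperator = ","
--
-- def split_to_info( lines:list ):
--     rlist = []
--     new_method = True
--     for l in lines :
--         r = l.split(comment_marker)[0] #delete comments
--         words0 = r.split() #split each line into words
--         words = []
--         for w in words0: # deal with construction seperator
--             if len(w) >= len(construction_seperator)+1 and w[-len(construction_seperator):] == construction_seperator:
--                 words.append(w[:-1])
--                 words.append(construction_seperator)
--             else:
--                 words.append(w)
--         if words == [] :
--             new_method = True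
--             continue
--         if new_method :
--             new_method = False
--             rlist += [[words]]
--         else:
--             rlist[-1] += [words]
--     return rlist # a list, each term corresponds to a new method. each term is a list of lines, each line is a list of words
-- ===== SOURCE B (Python) =====
-- comment_marker = "#"
--
-- construction_seperator = ","
--
-- def _parse_line(l):
--     sep = construction_seperator
--     return [x
--             for w in l.split(comment_marker)[0].split()
--             for x in ([w[:-1], sep] if len(w) >= len(sep) + 1 and w.endswith(sep) else [w])]
--
-- def split_to_info(lines):
--     parsed = [_parse_line(l) for l in lines]
--     cuts = [-1] + [i for i, ws in enumerate(parsed) if ws == []] + [len(parsed)]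
--     return [parsed[a + 1:b] for a, b in zip(cuts, cuts[1:]) if b - a > 1]
-- ===== Notes on version B (the rewrite author's own statement) =====
-- stated objective: alternative
-- what changed: Replaces A's single stateful loop (new_method flag, in-place rlist[-1] extension) by a staged boundary-index algorithm: parse every line, compute the list of blank-line cut indices with -1/len(parsed) sentinels, and return the slices of the parsed list between consecutive cuts that enclose at least one line.
import Mathlib
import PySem

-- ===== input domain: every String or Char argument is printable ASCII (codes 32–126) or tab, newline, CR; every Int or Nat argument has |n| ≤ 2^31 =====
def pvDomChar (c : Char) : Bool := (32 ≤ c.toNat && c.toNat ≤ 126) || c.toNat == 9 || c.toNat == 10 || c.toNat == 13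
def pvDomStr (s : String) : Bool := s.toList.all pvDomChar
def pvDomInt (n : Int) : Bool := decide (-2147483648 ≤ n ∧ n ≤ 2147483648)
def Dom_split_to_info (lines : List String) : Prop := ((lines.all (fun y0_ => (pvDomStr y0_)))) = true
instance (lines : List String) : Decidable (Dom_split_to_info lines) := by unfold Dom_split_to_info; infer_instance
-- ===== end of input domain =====

-- B replaces A's stateful flag loop (new_method / in-place rlist[-1] extension) by a staged
-- boundary-index algorithm: parse every line, compute the blank-line cut indices with -1/len
-- sentinels, and slice the parsed list between consecutive cuts; objective: alternative.

def pvCM : String := "#"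

def pvSEP : String := ","

-- ===== PORT A =====
-- r = l.split(comment_marker)[0]  (split on a nonempty separator always yields a nonempty list)
def pvStripComment (l : String) : String :=
  match PySem.Str.split? l pvCM with
  | some (p :: _) => p
  | _ => ""

-- the inner 'for w in words0' append loop of A
def pvExpandA (words : List String) (w : String) : List String :=
  if w.toList.length ≥ pvSEP.toList.length + 1 ∧
      PySem.Str.slice w (some (-(pvSEP.toList.length : Int))) none = pvSEP then
    (words ++ [PySem.Str.slice w none (some (-1))]) ++ [pvSEP]
  else
    words ++ [w]

-- one iteration of A's main loop over (rlist, new_method)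
def pvStepA (st : List (List (List String)) × Bool) (words : List String) :
    List (List (List String)) × Bool :=
  if words = [] then (st.1, true)
  else if st.2 then (st.1 ++ [[words]], false)
  else (st.1.dropLast ++ [st.1.getLast! ++ [words]], false)

def split_to_info (lines : List String) : List (List (List String)) :=
  (lines.foldl
    (fun st l =>
      let r := pvStripComment l
      let words := (PySem.Str.split₀ r).foldl pvExpandA []
      pvStepA st words)
    ([], true)).1

-- ===== PORT B =====
-- _parse_line of Source B (flattening comprehension)
def pvParseLineB (l : String) : List String :=
  (PySem.Str.split₀ (pvStripComment l)).flatMap (fun w =>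
    if w.toList.length ≥ pvSEP.toList.length + 1 ∧ PySem.Str.endswith w pvSEP then
      [PySem.Str.slice w none (some (-1)), pvSEP]
    else [w])

-- cuts = [-1] + [i for i, ws in enumerate(parsed) if ws == []] + [len(parsed)]
-- return [parsed[a+1:b] for a, b in zip(cuts, cuts[1:]) if b - a > 1]
def split_to_info_alt (lines : List String) : List (List (List String)) :=
  let parsed := lines.map pvParseLineB
  let cuts : List Int :=
    -1 :: (((PySem.List.enumerate parsed).filterMap
              (fun iws => if iws.2 = [] then some iws.1 else none))
            ++ [PySem.List.len parsed])
  (cuts.zip cuts.tail).filterMap (fun ab =>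
    if ab.2 - ab.1 > 1 then
      some (PySem.List.slice parsed (some (ab.1 + 1)) (some ab.2))
    else none)

-- ===== PRECONDITION & SPEC =====
def Spec_split_to_info (lines : List String) (out : List (List (List String))) : Prop := out = split_to_info_alt lines
instance (lines : List String) (out : List (List (List String))) : Decidable (Spec_split_to_info lines out) := by unfold Spec_split_to_info; infer_instance

-- ===== CLAIM =====
def Claim_equal_split_to_info : Prop := ∀ (lines : List String), Dom_split_to_info lines → Spec_split_to_info lines (split_to_info lines)

-- ===== LEMMAS AND PROOFS =====

-- A's per-word test (slice-from-the-end comparison) coincides with B's endswith test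
lemma expand_cond_eq (w : String) :
    (w.toList.length ≥ pvSEP.toList.length + 1 ∧
      PySem.Str.slice w (some (-(pvSEP.toList.length : Int))) none = pvSEP)
    ↔ (w.toList.length ≥ pvSEP.toList.length + 1 ∧ PySem.Str.endswith w pvSEP = true) := by
  have hs : pvSEP.toList.length = 1 := by decide
  have key : (PySem.Str.slice w (some (-(pvSEP.toList.length : Int))) none = pvSEP)
      ↔ PySem.Str.endswith w pvSEP = true := by
    rw [hs, Nat.cast_one, String.ext_iff, PySem.Str.toList_slice, PySem.Chars.slice_eq_listSlice,
      PySem.List.slice_from_neg_one, PySem.Str.endswith_eq, PySem.Chars.endswith_iff,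
      List.suffix_iff_eq_drop]
    constructor
    · intro h2; simpa using h2.symm
    · intro h2; simpa using h2.symm
  rw [key]

-- A's per-line append loop equals B's flattening comprehension, with any accumulator
lemma foldl_expand (ws : List String) (acc : List String) :
    ws.foldl pvExpandA acc = acc ++ ws.flatMap (fun w =>
      if w.toList.length ≥ pvSEP.toList.length + 1 ∧ PySem.Str.endswith w pvSEP then
        [PySem.Str.slice w none (some (-1)), pvSEP]
      else [w]) := by
  induction ws generalizing acc with
  | nil => simp
  | cons w ws ih =>
    simp only [List.foldl_cons, List.flatMap_cons, pvExpandA]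
    by_cases h : w.toList.length ≥ pvSEP.toList.length + 1 ∧ PySem.Str.endswith w pvSEP = true
    · rw [if_pos ((expand_cond_eq w).mpr h), if_pos h, ih]
      simp
    · rw [if_neg (fun hc => h ((expand_cond_eq w).mp hc)), if_neg h, ih]
      simp

lemma parse_eq (l : String) :
    (PySem.Str.split₀ (pvStripComment l)).foldl pvExpandA [] = pvParseLineB l := by
  rw [pvParseLineB, foldl_expand]
  simp

-- reference function: group the runs of non-empty word lists (proof-side only)
def pvGroupRuns : List (List String) → List (List (List String))
  | [] => []
  | ws :: rest =>
    if ws = [] then pvGroupRuns rest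
    else
      (ws :: rest.takeWhile (· ≠ [])) :: pvGroupRuns (rest.dropWhile (· ≠ []))
termination_by ps => ps.length
decreasing_by
  · simp
  · have := List.length_dropWhile_le (fun x => decide (x ≠ [])) rest
    simp only [List.length_cons]; omega

lemma groupRuns_nil : pvGroupRuns [] = [] := by rw [pvGroupRuns]

lemma groupRuns_cons_nil (rest : List (List String)) :
    pvGroupRuns ([] :: rest) = pvGroupRuns rest := by
  rw [pvGroupRuns]; simp

lemma groupRuns_cons_ne (ws : List String) (rest : List (List String)) (h : ws ≠ []) :
    pvGroupRuns (ws :: rest) =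
      (ws :: rest.takeWhile (· ≠ [])) :: pvGroupRuns (rest.dropWhile (· ≠ [])) := by
  rw [pvGroupRuns]; simp [h]

-- the fold/group equivalence: A's state machine in both flag states at once
lemma fold_group (ps : List (List String)) :
    (∀ acc : List (List (List String)),
      (ps.foldl pvStepA (acc, true)).1 = acc ++ pvGroupRuns ps) ∧
    (∀ (acc : List (List (List String))) (g : List (List String)),
      (ps.foldl pvStepA (acc ++ [g], false)).1 =
        acc ++ ((g ++ ps.takeWhile (· ≠ [])) :: pvGroupRuns (ps.dropWhile (· ≠ [])))) := by
  induction ps with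
  | nil =>
    constructor
    · intro acc; simp [groupRuns_nil]
    · intro acc g; simp [groupRuns_nil]
  | cons ws rest ih =>
    obtain ⟨ih1, ih2⟩ := ih
    by_cases h : ws = []
    · subst h
      constructor
      · intro acc
        simp only [List.foldl_cons, pvStepA, reduceIte]
        rw [ih1, groupRuns_cons_nil]
      · intro acc g
        simp only [List.foldl_cons, pvStepA, reduceIte]
        rw [ih1 (acc ++ [g])]
        simp [groupRuns_cons_nil]
    · constructor
      · intro acc
        simp only [List.foldl_cons, pvStepA, if_neg h, reduceIte]
        rw [ih2 acc [ws], groupRuns_cons_ne ws rest h]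
        simp
      · intro acc g
        simp only [List.foldl_cons, pvStepA, if_neg h, Bool.false_eq_true, reduceIte,
          List.dropLast_concat, List.getLast!_eq_getLast?_getD, List.getLast?_concat,
          Option.getD_some]
        rw [ih2 acc (g ++ [ws])]
        simp [h]

-- ===== B-side: cuts and slices =====

-- the blank-line indices of ps, enumerated from start s (proof-side)
def pvE (s : Int) (ps : List (List String)) : List Int :=
  (PySem.List.enumerate ps s).filterMap (fun iws => if iws.2 = [] then some iws.1 else none)

-- the slice comprehension over consecutive cut pairs, previous cut passed explicitly (proof-side)
def pvF (ps : List (List String)) (prev : Int) (cs : List Int) : List (List (List String)) :=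
  ((prev :: cs).zip cs).filterMap (fun ab =>
    if ab.2 - ab.1 > 1 then
      some (PySem.List.slice ps (some (ab.1 + 1)) (some ab.2))
    else none)

lemma pvE_nil (s : Int) : pvE s [] = [] := by simp [pvE, PySem.List.enumerate_nil]

lemma pvE_cons_nil (s : Int) (rest : List (List String)) :
    pvE s ([] :: rest) = s :: pvE (s + 1) rest := by
  simp [pvE, PySem.List.enumerate_cons]

lemma pvE_cons_ne (s : Int) (w : List String) (rest : List (List String)) (h : w ≠ []) :
    pvE s (w :: rest) = pvE (s + 1) rest := by
  simp [pvE, PySem.List.enumerate_cons, h]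

lemma pvE_append_ne (t u : List (List String)) (h : ∀ x ∈ t, x ≠ []) :
    ∀ s : Int, pvE s (t ++ u) = pvE (s + t.length) u := by
  induction t with
  | nil => intro s; simp
  | cons x t ih =>
    intro s
    rw [List.cons_append, pvE_cons_ne s x (t ++ u) (h x (by simp)),
      ih (fun y hy => h y (by simp [hy])) (s + 1)]
    congr 1
    simp only [List.length_cons]
    push_cast
    ring

lemma pvF_nil (ps : List (List String)) (prev : Int) : pvF ps prev [] = [] := rfl

lemma pvF_cons (ps : List (List String)) (prev c : Int) (cs : List Int) :
    pvF ps prev (c :: cs) =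
      (if c - prev > 1 then [PySem.List.slice ps (some (prev + 1)) (some c)] else [])
        ++ pvF ps c cs := by
  unfold pvF
  rw [show ((prev :: c :: cs).zip (c :: cs)) = (prev, c) :: ((c :: cs).zip cs) from rfl,
    List.filterMap_cons]
  split_ifs <;> simp

-- main lemma: on any suffix qs = ps.drop p, the cut-pair slices compute the grouped runs
lemma pvFgen (n : Nat) : ∀ (qs ps : List (List String)) (p : Nat),
    qs.length ≤ n → ps.drop p = qs → p + qs.length = ps.length →
    pvF ps ((p : Int) - 1) (pvE (p : Int) qs ++ [(ps.length : Int)]) = pvGroupRuns qs := by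
  induction n with
  | zero =>
    intro qs ps p hn hdrop hlen
    have hq : qs = [] := List.eq_nil_of_length_eq_zero (Nat.le_zero.mp hn)
    subst hq
    rw [pvE_nil, List.nil_append, pvF_cons, pvF_nil, groupRuns_nil]
    have : ¬ ((ps.length : Int) - ((p : Int) - 1) > 1) := by omega
    rw [if_neg this, List.append_nil]
  | succ n ih =>
    intro qs ps p hn hdrop hlen
    match qs with
    | [] =>
      rw [pvE_nil, List.nil_append, pvF_cons, pvF_nil, groupRuns_nil]
      have : ¬ ((ps.length : Int) - ((p : Int) - 1) > 1) := by
        simp at hlen; omega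
      rw [if_neg this, List.append_nil]
    | [] :: rest =>
      rw [pvE_cons_nil, groupRuns_cons_nil, List.cons_append, pvF_cons]
      have hc : ¬ ((p : Int) - ((p : Int) - 1) > 1) := by omega
      rw [if_neg hc, List.nil_append]
      have hdrop' : ps.drop (p + 1) = rest := by
        have h2 : ps.drop (p + 1) = (ps.drop p).drop 1 := by rw [List.drop_drop]
        rw [h2, hdrop]; rfl
      have := ih rest ps (p + 1) (by simp at hn; omega) hdrop'
        (by simp at hlen ⊢; omega)
      push_cast at this ⊢
      convert this using 3 <;> ring
    | w :: rest =>
      by_cases hw : w = []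
      · subst hw
        rw [pvE_cons_nil, groupRuns_cons_nil, List.cons_append, pvF_cons]
        have hc : ¬ ((p : Int) - ((p : Int) - 1) > 1) := by omega
        rw [if_neg hc, List.nil_append]
        have hdrop' : ps.drop (p + 1) = rest := by
          have h2 : ps.drop (p + 1) = (ps.drop p).drop 1 := by rw [List.drop_drop]
          rw [h2, hdrop]; rfl
        have := ih rest ps (p + 1) (by simp at hn; omega) hdrop'
          (by simp at hlen ⊢; omega)
        push_cast at this ⊢
        convert this using 3 <;> ring
      · have hsplit : rest.takeWhile (· ≠ []) ++ rest.dropWhile (· ≠ []) = rest :=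
          List.takeWhile_append_dropWhile
        have htne : ∀ x ∈ rest.takeWhile (· ≠ []), x ≠ [] := by
          intro x hx
          simpa using List.mem_takeWhile_imp hx
        rw [pvE_cons_ne _ _ _ hw, groupRuns_cons_ne w rest hw]
        have hpvE : pvE ((p : Int) + 1) rest
            = pvE ((p : Int) + 1 + (rest.takeWhile (· ≠ [])).length)
                (rest.dropWhile (· ≠ [])) := by
          conv_lhs => rw [← hsplit]
          rw [pvE_append_ne _ _ htne]
        rw [hpvE]
        cases hdm : rest.dropWhile (· ≠ []) with
        | nil =>
          rw [pvE_nil, List.nil_append, pvF_cons, pvF_nil, List.append_nil, groupRuns_nil]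
          have htres : rest.takeWhile (· ≠ []) = rest := by
            have h3 := hsplit
            rw [hdm, List.append_nil] at h3
            exact h3
          have hlen2 : p + (rest.length + 1) = ps.length := by simp at hlen; omega
          have hcond : ((ps.length : Int) - ((p : Int) - 1) > 1) := by omega
          rw [if_pos hcond]
          congr 1
          have hp1 : (p : Int) - 1 + 1 = ((p : Nat) : Int) := by ring
          rw [hp1, show ((ps.length : Int)) = (((ps.length : Nat)) : Int) from rfl,
            PySem.List.slice_natCast, hdrop, htres]
          have h4 : ps.length - p = (w :: rest).length := by simp at hlen ⊢; omega
          rw [h4, List.take_length]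
        | cons e d' =>
          have he : e = [] := by
            have h0 := List.head?_dropWhile_not (p := fun x => decide (x ≠ [])) rest
            rw [hdm] at h0
            simpa using h0
          subst he
          rw [pvE_cons_nil, List.cons_append, pvF_cons]
          have hrest : rest = rest.takeWhile (· ≠ []) ++ [] :: d' := by
            conv_lhs => rw [← hsplit, hdm]
          have hlen2 : p + ((rest.takeWhile (· ≠ [])).length + d'.length + 2) = ps.length := by
            rw [hrest] at hlen
            simp at hlen ⊢
            omega
          have hcond : ((p : Int) + 1 + ((rest.takeWhile (· ≠ [])).length : Int))
              - ((p : Int) - 1) > 1 := by omega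
          rw [if_pos hcond]
          -- the first slice is w :: takeWhile rest
          have hslice : PySem.List.slice ps (some ((p : Int) - 1 + 1))
              (some ((p : Int) + 1 + ((rest.takeWhile (· ≠ [])).length : Int)))
              = w :: rest.takeWhile (· ≠ []) := by
            have hp1 : (p : Int) - 1 + 1 = ((p : Nat) : Int) := by ring
            have hc1 : (p : Int) + 1 + ((rest.takeWhile (· ≠ [])).length : Int)
                = (((p + 1 + (rest.takeWhile (· ≠ [])).length : Nat)) : Int) := by
              push_cast; ring
            rw [hp1, hc1, PySem.List.slice_natCast, hdrop]
            have harith : p + 1 + (rest.takeWhile (· ≠ [])).length - p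
                = (rest.takeWhile (· ≠ [])).length + 1 := by omega
            rw [harith]
            have h7 := congrArg (List.take ((rest.takeWhile (· ≠ [])).length)) hrest
            rw [List.take_left] at h7
            rw [List.take_succ_cons, h7]
          rw [hslice]
          -- the remaining cut pairs compute the runs of d'
          have hdrop' : ps.drop (p + 1 + (rest.takeWhile (· ≠ [])).length + 1) = d' := by
            have h2 : (((ps.drop p).drop 1).drop ((rest.takeWhile (· ≠ [])).length)).drop 1
                = ps.drop (p + 1 + (rest.takeWhile (· ≠ [])).length + 1) := by
              simp [List.drop_drop]
            rw [← h2, hdrop]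
            have h6 := congrArg (List.drop ((rest.takeWhile (· ≠ [])).length)) hrest
            rw [List.drop_left] at h6
            show ((rest.drop ((rest.takeWhile (· ≠ [])).length))).drop 1 = d'
            rw [h6, List.drop_one, List.tail_cons]
          have hrec := ih d' ps (p + 1 + (rest.takeWhile (· ≠ [])).length + 1)
            (by
              have h5 : (w :: rest).length ≤ n + 1 := hn
              rw [hrest] at h5
              simp at h5
              omega)
            hdrop'
            (by omega)
          have hcast : ((p + 1 + (rest.takeWhile (· ≠ [])).length + 1 : Nat) : Int) - 1
              = (p : Int) + 1 + ((rest.takeWhile (· ≠ [])).length : Int) := by push_cast; ring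
          have hcast2 : ((p + 1 + (rest.takeWhile (· ≠ [])).length + 1 : Nat) : Int)
              = (p : Int) + 1 + ((rest.takeWhile (· ≠ [])).length : Int) + 1 := by
            push_cast; ring
          rw [hcast, hcast2] at hrec
          rw [hrec, groupRuns_cons_nil]
          simp

-- ===== VERDICT (by name: the statement is the Claim_ definition above) =====
theorem split_to_info_spec : Claim_equal_split_to_info := by
  intro lines _
  unfold Spec_split_to_info split_to_info split_to_info_alt
  have hmap : lines.foldl
      (fun st l =>
        let r := pvStripComment l
        let words := (PySem.Str.split₀ r).foldl pvExpandA []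
        pvStepA st words) (([], true) : List (List (List String)) × Bool)
      = (lines.map pvParseLineB).foldl pvStepA ([], true) := by
    rw [List.foldl_map]
    simp only [parse_eq]
  rw [hmap, (fold_group (lines.map pvParseLineB)).1 []]
  show pvGroupRuns (lines.map pvParseLineB)
      = pvF (lines.map pvParseLineB) (-1) (pvE 0 (lines.map pvParseLineB)
          ++ [PySem.List.len (lines.map pvParseLineB)])
  rw [PySem.List.len_eq]
  have := pvFgen (lines.map pvParseLineB).length (lines.map pvParseLineB)
    (lines.map pvParseLineB) 0 (le_refl _) (by simp) (by simp)
  simpa using this.symm
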